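-- pv_equiv track=rewrite | github.com/zhaoliu0914/CSE4256 | Day4Problems.py | path_d
-- ===== SOURCE A (Python) =====
-- def path_d(n):
--     matrix_di = {}
--
--     for index in range(n):
--         temp_array = []
--
--         last_index = index - 1
--         next_index = index + 1
--         if last_index >= 0:
--             temp_array.append(last_index)
--         if next_index < n:
--             temp_array.append(next_index)
--
--         matrix_di[index] = temp_array
--     return matrix_di
-- ===== SOURCE B (Python) =====
-- def path_d(n):
--     matrix_di = {i: [] for i in range(n)}
--     for i in range(n - 1):
--         matrix_di[i].append(i + 1)
--         matrix_di[i + 1].append(i)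
--     return matrix_di
-- ===== Notes on version B (the rewrite author's own statement) =====
-- stated objective: alternative
-- what changed: B first builds the adjacency dict with an empty list per node, then populates it symmetrically from the n-1 edges (append i+1 to node i and i to node i+1), replacing A's per-node loop with boundary if-checks by an edge-driven pass with no conditionals.
import Mathlib
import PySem

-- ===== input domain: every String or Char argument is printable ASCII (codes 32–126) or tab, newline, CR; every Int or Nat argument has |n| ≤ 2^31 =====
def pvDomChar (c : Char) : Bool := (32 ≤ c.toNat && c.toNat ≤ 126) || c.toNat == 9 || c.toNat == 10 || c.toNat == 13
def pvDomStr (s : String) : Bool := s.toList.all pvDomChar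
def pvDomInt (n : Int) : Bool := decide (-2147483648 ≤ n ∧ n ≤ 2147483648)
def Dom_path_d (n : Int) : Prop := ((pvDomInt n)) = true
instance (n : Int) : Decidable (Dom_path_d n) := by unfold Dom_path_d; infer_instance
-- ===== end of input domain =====

-- B builds the dict with an empty list per node and then populates it edge-by-edge
-- (symmetric appends, no boundary conditionals), instead of A's per-node loop with if-checks.

-- ===== PORT A =====
def path_d (n : Int) : List (Int × List Int) :=
  ((PySem.List.pyRange 0 n 1).foldl
    (fun matrix_di index =>
      let temp_array : List Int := []
      let last_index := index - 1
      let next_index := index + 1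
      let temp_array := if 0 ≤ last_index then temp_array ++ [last_index] else temp_array
      let temp_array := if next_index < n then temp_array ++ [next_index] else temp_array
      matrix_di.insert index temp_array)
    PySem.Dict.empty).items

-- ===== PORT B =====
def path_d_alt (n : Int) : List (Int × List Int) :=
  let matrix_di : PySem.Dict Int (List Int) :=
    (PySem.List.pyRange 0 n 1).foldl (fun d i => d.insert i []) PySem.Dict.empty
  ((PySem.List.pyRange 0 (n - 1) 1).foldl
    (fun d i => (d.modify i [] (· ++ [i + 1])).modify (i + 1) [] (· ++ [i]))
    matrix_di).items

-- ===== PRECONDITION & SPEC =====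
def Spec_path_d (n : Int) (out : List (Int × List Int)) : Prop := out = path_d_alt n
instance (n : Int) (out : List (Int × List Int)) : Decidable (Spec_path_d n out) := by unfold Spec_path_d; infer_instance

-- ===== CLAIM (what is proved, stated in full; the proofs are below) =====
def Claim_equal_path_d : Prop := ∀ (n : Int), Dom_path_d n → Spec_path_d n (path_d n)

-- ===== LEMMAS AND PROOFS =====

-- A's neighbour list for node i, written exactly as A's loop body builds it
def nbrsA (n i : Int) : List Int :=
  let t : List Int := []
  let t := if 0 ≤ i - 1 then t ++ [i - 1] else t
  if i + 1 < n then t ++ [i + 1] else t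

theorem nbrsA_eq (n i : Int) :
    nbrsA n i = (if 0 ≤ i - 1 then [i - 1] else []) ++ (if i + 1 < n then [i + 1] else []) := by
  unfold nbrsA
  split_ifs <;> simp

-- B's neighbour list for node i after the first k edges have been processed
def nbrsB (k i : Int) : List Int :=
  (if 1 ≤ i ∧ i ≤ k then [i - 1] else []) ++ (if i < k then [i + 1] else [])

theorem path_d_def (n : Int) :
    path_d n = ((PySem.List.pyRange 0 n 1).foldl
      (fun d i => d.insert i (nbrsA n i)) PySem.Dict.empty).items := rfl

theorem path_d_eq_map (n : Int) :
    path_d n = (PySem.List.pyRange 0 n 1).map (fun i => (i, nbrsA n i)) := by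
  rw [path_d_def]
  rw [PySem.Dict.items_foldl_insert_fresh (PySem.List.pyRange 0 n 1) (fun i => i)
        (fun i => nbrsA n i) PySem.Dict.empty
        (by intro a _; simp [PySem.Dict.contains_empty])
        (by simpa using PySem.List.nodup_pyRange_one (a := 0) (b := n))]
  rfl

theorem init_eq_map (n : Int) :
    ((PySem.List.pyRange 0 n 1).foldl
      (fun d i => d.insert i ([] : List Int)) PySem.Dict.empty).items
    = (PySem.List.pyRange 0 n 1).map (fun i => (i, ([] : List Int))) := by
  rw [PySem.Dict.items_foldl_insert_fresh (PySem.List.pyRange 0 n 1) (fun i => i)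
        (fun _ => ([] : List Int)) PySem.Dict.empty
        (by intro a _; simp [PySem.Dict.contains_empty])
        (by simpa using PySem.List.nodup_pyRange_one (a := 0) (b := n))]
  rfl

-- modify on a dict whose items are a map over the range rewrites one entry
theorem items_modify_map (n j : Int) (g : Int → List Int) (f : List Int → List Int)
    (d : PySem.Dict Int (List Int))
    (hd : d.items = (PySem.List.pyRange 0 n 1).map (fun i => (i, g i)))
    (h0 : 0 ≤ j) (hj : j < n) :
    (d.modify j [] f).items
      = (PySem.List.pyRange 0 n 1).map (fun i => (i, if i = j then f (g j) else g i)) := by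
  have hkeys : d.keys = PySem.List.pyRange 0 n 1 := by
    simp [PySem.Dict.keys, hd, List.map_map, Function.comp_def]
  have hnodup : d.keys.Nodup := by
    rw [hkeys]; exact PySem.List.nodup_pyRange_one 0 n
  have hmem : (j, g j) ∈ d.items := by
    rw [hd]
    exact List.mem_map.mpr ⟨j, PySem.List.mem_pyRange_one.mpr ⟨h0, hj⟩, rfl⟩
  have hget : d.getD j [] = g j := PySem.Dict.getD_of_mem_items d hmem hnodup []
  have hcon : d.contains j = true :=
    (PySem.Dict.contains_iff_mem_keys d j).mpr (PySem.Dict.mem_keys_of_mem_items d hmem)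
  unfold PySem.Dict.modify
  rw [hget, PySem.Dict.items_insert_of_contains d (f (g j)) hcon, hd, List.map_map]
  apply List.map_congr_left
  intro i _
  by_cases h : i = j <;> simp [h]

-- B's neighbour lists coincide with A's once all n-1 edges are processed
theorem nbrsB_eq_nbrsA (n i : Int) (h0 : 0 ≤ i) (hn : i < n) :
    nbrsB (n - 1) i = nbrsA n i := by
  unfold nbrsB
  rw [nbrsA_eq]
  congr 1
  · by_cases h : (1:Int) ≤ i
    · rw [if_pos ⟨h, by omega⟩, if_pos (by omega)]
    · rw [if_neg (by omega), if_neg (by omega)]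
  · by_cases h : i + 1 < n
    · rw [if_pos (by omega), if_pos h]
    · rw [if_neg (by omega), if_neg h]

-- the edge-population loop invariant, by induction on the number of processed edges
theorem edge_fold (n : Int) (m : Nat) (hkn : (m : Int) ≤ n - 1) :
    ((PySem.List.pyRange 0 (m : Int) 1).foldl
      (fun d i => (d.modify i [] (· ++ [i + 1])).modify (i + 1) [] (· ++ [i]))
      ((PySem.List.pyRange 0 n 1).foldl
        (fun d i => d.insert i ([] : List Int)) PySem.Dict.empty)).items
    = (PySem.List.pyRange 0 n 1).map (fun i => (i, nbrsB (m : Int) i)) := by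
  induction m with
  | zero =>
      rw [show PySem.List.pyRange 0 ((0:Nat):Int) 1 = [] from
            PySem.List.pyRange_one_eq_nil (by norm_num)]
      simp only [List.foldl_nil]
      rw [init_eq_map]
      apply List.map_congr_left
      intro i hi
      have hi' := PySem.List.mem_pyRange_one.mp hi
      simp only [nbrsB, Prod.mk.injEq, true_and]
      split_ifs <;> first | (exfalso; omega) | (simp only [List.nil_append])
  | succ m ih =>
      have ih' := ih (by push_cast at hkn ⊢; omega)
      have hcast : ((m + 1 : Nat) : Int) = (m : Int) + 1 := by push_cast; ring
      rw [hcast] at hkn ⊢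
      rw [PySem.List.pyRange_one_succ_right (Int.natCast_nonneg m), List.foldl_append]
      simp only [List.foldl_cons, List.foldl_nil]
      rw [items_modify_map n ((m : Int) + 1)
            (fun i => if i = (m : Int) then (· ++ [(m : Int) + 1]) (nbrsB (m : Int) (m : Int))
                      else nbrsB (m : Int) i) (· ++ [(m : Int)])
            _
            (items_modify_map n (m : Int) (fun i => nbrsB (m : Int) i) (· ++ [(m : Int) + 1]) _
              ih' (Int.natCast_nonneg m) (by omega))
            (by omega) (by omega)]
      apply List.map_congr_left
      intro i hi
      have hi' := PySem.List.mem_pyRange_one.mp hi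
      simp only [nbrsB, Prod.mk.injEq, true_and]
      split_ifs <;> (try (exfalso; omega)) <;> (try simp) <;> omega

-- ===== VERDICT (by name: the statement is the Claim_ definition above) =====
theorem path_d_spec : Claim_equal_path_d := by
  intro n _
  show path_d n = path_d_alt n
  by_cases hn : n ≤ 0
  · unfold path_d path_d_alt
    rw [show PySem.List.pyRange 0 n 1 = [] from PySem.List.pyRange_one_eq_nil (by omega),
        show PySem.List.pyRange 0 (n - 1) 1 = [] from PySem.List.pyRange_one_eq_nil (by omega)]
    rfl
  · have hn' : 0 < n := by omega
    rw [path_d_eq_map]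
    show _ = ((PySem.List.pyRange 0 (n - 1) 1).foldl
      (fun d i => (d.modify i [] (· ++ [i + 1])).modify (i + 1) [] (· ++ [i]))
      ((PySem.List.pyRange 0 n 1).foldl
        (fun d i => d.insert i ([] : List Int)) PySem.Dict.empty)).items
    have hm : (((n - 1).toNat : Nat) : Int) = n - 1 := Int.toNat_of_nonneg (by omega)
    rw [show PySem.List.pyRange 0 (n - 1) 1 = PySem.List.pyRange 0 (((n - 1).toNat : Nat) : Int) 1
          by rw [hm]]
    rw [edge_fold n (n - 1).toNat (by omega), hm]
    apply List.map_congr_left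
    intro i hi
    have hi' := PySem.List.mem_pyRange_one.mp hi
    rw [nbrsB_eq_nbrsA n i hi'.1 hi'.2]
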